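-- pv_equiv track=rewrite | github.com/ontoinsights/deep_narrative_analysis | dna/create_entities_turtle.py | _add_labels_to_ttl
-- ===== SOURCE A (Python) =====
-- def _add_labels_to_ttl(entity_iri: str, labels: list, ttl_list: list):
--     """
--     Processing of the labels' text and their addition to the Turtle.
--
--     :param entity_iri: String holding the IRI of the entity
--     :param labels: Array of the entity's labels
--     :param ttl_list: An array of the current Turtle for the entity
--     :return: None (ttl_list is updated)
--     """
--     new_labels = []
--     for label in labels:
--         # Remove articles
--         new_label = label
--         for article in ('a ', 'A ', 'an ', 'An ', 'the ', 'The '):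
--             if label.startswith(article):
--                 new_label = label[len(article):]
--                 break
--         new_labels.append(new_label)
--     labels_str = '", "'.join(new_labels)
--     ttl_list.append(f'{entity_iri} rdfs:label "{labels_str}" .')
--     return ttl_list
-- ===== SOURCE B (Python) =====
-- def _add_labels_to_ttl(entity_iri: str, labels: list, ttl_list: list):
--     new_labels = []
--     for label in labels:
--         parts = label.split(' ', 1)
--         if len(parts) == 2 and parts[0] in {'a', 'A', 'an', 'An', 'the', 'The'}:
--             new_labels.append(parts[1])
--         else:
--             new_labels.append(label)
--     labels_str = '", "'.join(new_labels)
--     ttl_list.append(f'{entity_iri} rdfs:label "{labels_str}" .')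
--     return ttl_list
-- ===== Notes on version B (the rewrite author's own statement) =====
-- stated objective: idiomatic
-- what changed: Instead of trying six article prefixes in order with startswith/break per label, B splits each label once at the first space and looks the first token up in a set of article words.
import Mathlib
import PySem

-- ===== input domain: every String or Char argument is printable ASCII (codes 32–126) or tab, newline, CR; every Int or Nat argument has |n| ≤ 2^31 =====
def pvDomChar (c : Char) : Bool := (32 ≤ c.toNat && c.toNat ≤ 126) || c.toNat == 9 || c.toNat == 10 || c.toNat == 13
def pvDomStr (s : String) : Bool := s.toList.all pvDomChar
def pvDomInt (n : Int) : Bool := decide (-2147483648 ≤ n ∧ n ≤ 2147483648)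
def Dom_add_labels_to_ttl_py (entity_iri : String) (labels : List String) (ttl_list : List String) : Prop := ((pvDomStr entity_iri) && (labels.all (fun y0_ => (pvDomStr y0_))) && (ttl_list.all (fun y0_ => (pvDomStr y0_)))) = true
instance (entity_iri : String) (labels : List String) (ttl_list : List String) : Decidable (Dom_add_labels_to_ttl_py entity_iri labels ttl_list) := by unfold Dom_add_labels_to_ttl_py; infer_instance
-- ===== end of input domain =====

set_option maxRecDepth 4000


-- B replaces A's ordered six-prefix startswith/break loop by splitting each label once at the
-- first space and looking the first token up among the article words (idiomatic, same cost).
-- Both versions also append the produced line to ttl_list in place (same mutation); the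
-- equivalence proved here is about the returned list, which includes that appended line.

-- ===== PORT A =====
-- the tuple ('a ', 'A ', 'an ', 'An ', 'the ', 'The ') as lists of code points
def pvArticlesA : List (List Char) :=
  [['a', ' '], ['A', ' '], ['a', 'n', ' '], ['A', 'n', ' '],
   ['t', 'h', 'e', ' '], ['T', 'h', 'e', ' ']]

-- the inner 'for article in (…): if label.startswith(article): new_label = label[len(article):]; break'
-- (label[len(article):] with a nonnegative index is List.drop)
def pvAStrip : List (List Char) → List Char → List Char
  | [], cs => cs
  | art :: rest, cs =>
      if PySem.Chars.startswith cs art then cs.drop art.length else pvAStrip rest cs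

def add_labels_to_ttl_py (entity_iri : String) (labels : List String) (ttl_list : List String) : List String :=
  -- outer loop: new_labels.append(new_label) for each label
  let new_labels := labels.map (fun label => String.ofList (pvAStrip pvArticlesA label.toList))
  let labels_str := PySem.Str.join "\", \"" new_labels
  ttl_list ++ [entity_iri ++ " rdfs:label \"" ++ labels_str ++ "\" ."]

-- ===== PORT B =====
def pvArticleWords : List (List Char) :=
  [['a'], ['A'], ['a', 'n'], ['A', 'n'], ['t', 'h', 'e'], ['T', 'h', 'e']]

-- label.split(' ', 1): the part before the first space and, if a space exists, the part after it
-- (exact: sep is the single char ' ' and maxsplit is 1, so this is takeWhile/dropWhile at the first ' ')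
def pvBStrip (cs : List Char) : List Char :=
  let w := cs.takeWhile (· != ' ')
  match cs.dropWhile (· != ' ') with
  | ' ' :: tail => if w ∈ pvArticleWords then tail else cs   -- len(parts) == 2 and parts[0] in the set
  | _ => cs                                                   -- no space: parts == [label]

def add_labels_to_ttl_py_alt (entity_iri : String) (labels : List String) (ttl_list : List String) : List String :=
  let new_labels := labels.map (fun label => String.ofList (pvBStrip label.toList))
  let labels_str := PySem.Str.join "\", \"" new_labels
  ttl_list ++ [entity_iri ++ " rdfs:label \"" ++ labels_str ++ "\" ."]

-- ===== PRECONDITION & SPEC =====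
def Spec_add_labels_to_ttl_py (entity_iri : String) (labels : List String) (ttl_list : List String) (out : List String) : Prop := out = add_labels_to_ttl_py_alt entity_iri labels ttl_list
instance (entity_iri : String) (labels : List String) (ttl_list : List String) (out : List String) : Decidable (Spec_add_labels_to_ttl_py entity_iri labels ttl_list out) := by unfold Spec_add_labels_to_ttl_py; infer_instance

-- ===== CLAIM (what is proved, stated in full; the proofs are below) =====
def Claim_equal_add_labels_to_ttl_py : Prop := ∀ (entity_iri : String) (labels : List String) (ttl_list : List String), Dom_add_labels_to_ttl_py entity_iri labels ttl_list → Spec_add_labels_to_ttl_py entity_iri labels ttl_list (add_labels_to_ttl_py entity_iri labels ttl_list)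

-- ===== LEMMAS AND PROOFS =====

-- a space-free word followed by ' ' is recovered exactly by a prefix article u++[' '] with u space-free
theorem pv_prefix_article (u : List Char) : ∀ (w tail : List Char),
    (∀ c ∈ u, c ≠ ' ') → (∀ c ∈ w, c ≠ ' ') →
    (u ++ [' ']) <+: (w ++ ' ' :: tail) → u = w := by
  induction u with
  | nil =>
    intro w tail _ hw h
    cases w with
    | nil => rfl
    | cons c w' =>
      exfalso
      rcases h with ⟨t, ht⟩
      simp at ht
      exact hw c (by simp) ht.1.symm
  | cons a u' ih =>
    intro w tail hu hw h
    cases w with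
    | nil =>
      exfalso
      rcases h with ⟨t, ht⟩
      simp at ht
      exact hu a (by simp) ht.1
    | cons c w' =>
      rcases h with ⟨t, ht⟩
      simp at ht
      obtain ⟨hac, hrest⟩ := ht
      have : u' = w' := by
        refine ih w' tail (fun x hx => hu x (by simp [hx]))
          (fun x hx => hw x (by simp [hx])) ⟨t, ?_⟩
        simpa using hrest
      simp [hac, this]

theorem pv_aStrip_of_no_prefix (arts : List (List Char)) (cs : List Char)
    (h : ∀ art ∈ arts, ¬ (art <+: cs)) : pvAStrip arts cs = cs := by
  induction arts with
  | nil => rfl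
  | cons art rest ih =>
    have h1 : ¬ PySem.Chars.startswith cs art = true := by
      rw [PySem.Chars.startswith_iff]
      exact h art (by simp)
    simp only [pvAStrip, h1, if_false, Bool.false_eq_true]
    exact ih (fun a ha => h a (by simp [ha]))

theorem pv_dropWhile_head_false {p : Char → Bool} {c : Char} {t : List Char} :
    ∀ l : List Char, l.dropWhile p = c :: t → p c = false := by
  intro l
  induction l with
  | nil => intro h; simp at h
  | cons a l' ih =>
    intro h
    by_cases hp : p a
    · exact ih (by simpa [List.dropWhile, hp] using h)
    · rw [List.dropWhile_cons_of_neg hp] at h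
      cases h
      simpa using hp

theorem pv_strip_eq (cs : List Char) : pvAStrip pvArticlesA cs = pvBStrip cs := by
  have hw : ∀ c ∈ cs.takeWhile (· != ' '), c ≠ ' ' := by
    intro c hc
    have := List.mem_takeWhile_imp hc
    simpa using this
  have hsplit : cs.takeWhile (· != ' ') ++ cs.dropWhile (· != ' ') = cs :=
    List.takeWhile_append_dropWhile
  unfold pvBStrip
  cases hr : cs.dropWhile (· != ' ') with
  | nil =>
    -- no space in cs at all: no article (each ends in ' ') is a prefix
    have hnospace : ∀ c ∈ cs, c ≠ ' ' := by
      intro c hc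
      have := (List.dropWhile_eq_nil_iff.mp hr) c hc
      simpa using this
    refine pv_aStrip_of_no_prefix _ _ ?_
    intro art hart hpre
    have hsp : (' ' : Char) ∈ art := by
      simp [pvArticlesA, List.mem_cons] at hart
      rcases hart with h|h|h|h|h|h <;> simp [h]
    exact hnospace ' ' (hpre.subset hsp) rfl
  | cons c tail =>
    have hc : c = ' ' := by
      have := pv_dropWhile_head_false cs hr
      simpa using this
    subst hc
    have hcs : cs = cs.takeWhile (· != ' ') ++ ' ' :: tail := by
      conv_lhs => rw [← hsplit, hr]
    by_cases hmem : cs.takeWhile (· != ' ') ∈ pvArticleWords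
    · simp only [hmem, if_true]
      have hmem' := hmem
      simp only [pvArticleWords, List.mem_cons, List.not_mem_nil, or_false] at hmem'
      rcases hmem' with h|h|h|h|h|h <;>
        · rw [h] at hcs
          rw [hcs]
          simp [pvAStrip, pvArticlesA, PySem.Chars.startswith_iff]
    · simp only [hmem, if_false]
      refine pv_aStrip_of_no_prefix _ _ ?_
      intro art hart hpre
      rw [hcs] at hpre
      apply hmem
      simp only [pvArticlesA, List.mem_cons, List.not_mem_nil, or_false] at hart
      simp only [pvArticleWords, List.mem_cons, List.not_mem_nil, or_false]
      rcases hart with h|h|h|h|h|h <;> subst h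
      · exact Or.inl (pv_prefix_article ['a'] _ tail (by simp) hw hpre).symm
      · exact Or.inr (Or.inl (pv_prefix_article ['A'] _ tail (by simp) hw hpre).symm)
      · exact Or.inr (Or.inr (Or.inl (pv_prefix_article ['a','n'] _ tail (by simp) hw hpre).symm))
      · exact Or.inr (Or.inr (Or.inr (Or.inl (pv_prefix_article ['A','n'] _ tail (by simp) hw hpre).symm)))
      · exact Or.inr (Or.inr (Or.inr (Or.inr (Or.inl (pv_prefix_article ['t','h','e'] _ tail (by simp) hw hpre).symm))))
      · exact Or.inr (Or.inr (Or.inr (Or.inr (Or.inr (pv_prefix_article ['T','h','e'] _ tail (by simp) hw hpre).symm))))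

-- ===== VERDICT (by name: the statement is the Claim_ definition above) =====
theorem add_labels_to_ttl_py_spec : Claim_equal_add_labels_to_ttl_py := by
  intro entity_iri labels ttl_list _
  unfold Spec_add_labels_to_ttl_py add_labels_to_ttl_py add_labels_to_ttl_py_alt
  simp only [pv_strip_eq]
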